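-- pv_equiv track=rewrite | github.com/Galaktikkon/ToC | lab5/main.py | get_indexed_word
-- ===== SOURCE A (Python) =====
-- def get_indexed_word(w: str) -> list[str]:
--
--     C: dict[str, int] = {}
--
--     indexed_word: list[str] = []
--
--     for letter in w:
--
--         if letter in C:
--             C[letter] += 1
--         else:
--             C[letter] = 1
--
--         indexed_word.append(letter + str(C[letter]))
--
--     return indexed_word
-- ===== SOURCE B (Python) =====
-- def get_indexed_word(w: str) -> list[str]:
--     # Group positions by letter first, then scatter letter+rank into a
--     # preallocated output slot for each occurrence.
--     groups: dict[str, list[int]] = {}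
--     for i, letter in enumerate(w):
--         groups.setdefault(letter, []).append(i)
--     out = [""] * len(w)
--     for letter, positions in groups.items():
--         for rank, i in enumerate(positions, start=1):
--             out[i] = letter + str(rank)
--     return out
-- ===== Notes on version B (the rewrite author's own statement) =====
-- stated objective: alternative
-- what changed: Replaces A's single left-to-right pass with a running counter dict by a two-stage group-and-scatter: first collect the positions of each letter into per-letter lists, then write letter+rank into a preallocated output slot for each occurrence.
import Mathlib
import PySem

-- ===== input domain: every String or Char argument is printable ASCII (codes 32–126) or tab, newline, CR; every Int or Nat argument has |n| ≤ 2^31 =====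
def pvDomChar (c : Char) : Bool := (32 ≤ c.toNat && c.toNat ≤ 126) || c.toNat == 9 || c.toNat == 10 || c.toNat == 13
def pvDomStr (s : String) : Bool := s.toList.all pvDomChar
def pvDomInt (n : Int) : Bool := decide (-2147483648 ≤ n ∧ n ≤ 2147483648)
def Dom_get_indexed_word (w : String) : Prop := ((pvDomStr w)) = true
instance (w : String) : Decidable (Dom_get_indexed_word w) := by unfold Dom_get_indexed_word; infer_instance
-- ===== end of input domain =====

-- B replaces A's left-to-right running-counter loop by a two-stage group-and-scatter:
-- first group the positions of each letter, then write letter+rank into a preallocated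
-- output slot per occurrence (objective: alternative decomposition, same cost).

-- ===== PORT A =====
-- loop body: update the counter dict for `letter`, then append letter + str(C[letter])
def pvStepA (st : PySem.Dict Char Int × List String) (letter : Char) :
    PySem.Dict Char Int × List String :=
  let C := if st.1.contains letter then st.1.modify letter 0 (· + 1)
           else st.1.insert letter 1
  (C, st.2 ++ [String.ofList (letter :: PySem.Int.toChars (C.getD letter 0))])

def get_indexed_word (w : String) : List String :=
  (w.toList.foldl pvStepA (PySem.Dict.empty, [])).2

-- ===== PORT B =====
-- groups.setdefault(letter, []).append(i)  ==  groups[letter] = groups.get(letter, []) + [i],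
-- i.e. Dict.modify letter [] (· ++ [i]); then scatter letter+str(rank) into out[i].
def get_indexed_word_alt (w : String) : List String :=
  let chars := w.toList
  let groups : PySem.Dict Char (List Int) :=
    (PySem.List.enumerate chars).foldl
      (fun d p => d.modify p.2 [] (· ++ [p.1])) PySem.Dict.empty
  let out := List.replicate chars.length ""
  groups.items.foldl (fun out q =>
    (PySem.List.enumerate q.2 1).foldl
      (fun out r => PySem.List.pySetD out r.2 (String.ofList (q.1 :: PySem.Int.toChars r.1))) out) out

-- ===== PRECONDITION & SPEC =====
def Spec_get_indexed_word (w : String) (out : List String) : Prop := out = get_indexed_word_alt w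
instance (w : String) (out : List String) : Decidable (Spec_get_indexed_word w out) := by unfold Spec_get_indexed_word; infer_instance

-- ===== CLAIM (what is proved, stated in full; the proofs are below) =====
def Claim_equal_get_indexed_word : Prop := ∀ (w : String), Dom_get_indexed_word w → Spec_get_indexed_word w (get_indexed_word w)

-- ===== LEMMAS AND PROOFS =====

-- the common closed form: position k gets its letter's count in the inclusive prefix
def pvSpecList (l : List Char) : List String :=
  (PySem.List.enumerate l).map (fun p =>
    String.ofList (p.2 :: PySem.Int.toChars (((l.take (p.1.toNat + 1)).count p.2 : Nat) : Int)))

-- ---- A-side: the running-counter loop produces pvSpecList ----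
lemma pvStepA_getD (d : PySem.Dict Char Int) (c x : Char) :
    (pvStepA (d, []) c).1.getD x 0 = d.getD x 0 + (if x = c then 1 else 0) := by
  simp only [pvStepA]
  by_cases h : d.contains c = true
  · simp only [h, if_true]
    by_cases hx : x = c
    · subst hx; simp [PySem.Dict.getD_modify_self]
    · simp [PySem.Dict.getD_modify_of_ne d 0 _ hx, hx]
  · simp only [h, if_false, Bool.false_eq_true]
    by_cases hx : x = c
    · subst hx
      have h0 : d.getD x 0 = 0 := PySem.Dict.getD_of_not_contains d 0 (by simpa using h)
      simp [PySem.Dict.getD_insert_self, h0]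
    · simp [PySem.Dict.getD_insert_of_ne d _ _ hx, hx]

lemma pvStepA_fst (st : PySem.Dict Char Int × List String) (c : Char) :
    (pvStepA st c).1 = (pvStepA (st.1, []) c).1 := rfl

lemma pvStepA_snd (st : PySem.Dict Char Int × List String) (c : Char) :
    (pvStepA st c).2 = st.2 ++ [String.ofList (c :: PySem.Int.toChars ((pvStepA (st.1, []) c).1.getD c 0))] := rfl

lemma pvSpecList_append_singleton (l : List Char) (c : Char) :
    pvSpecList (l ++ [c]) =
      pvSpecList l ++ [String.ofList (c :: PySem.Int.toChars (((l ++ [c]).count c : Nat) : Int))] := by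
  unfold pvSpecList
  rw [PySem.List.enumerate_append, List.map_append]
  congr 1
  · apply List.map_congr_left
    intro p hp
    obtain ⟨k, hk, rfl⟩ := (PySem.List.mem_enumerate_iff _ _ _).1 hp
    have ht : (l ++ [c]).take (((0 : Int) + k).toNat + 1) = l.take (((0 : Int) + k).toNat + 1) := by
      apply List.take_append_of_le_length
      simp; omega
    rw [ht]
  · simp only [PySem.List.enumerate_cons, PySem.List.enumerate_nil, List.map_cons, List.map_nil]
    have ht : (l ++ [c]).take (((0 : Int) + l.length).toNat + 1) = l ++ [c] := by
      apply List.take_of_length_le; simp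
    rw [ht]

lemma pvLoop_invariant (l : List Char) :
    (∀ x, (l.foldl pvStepA (PySem.Dict.empty, [])).1.getD x 0 = (l.count x : Int)) ∧
    (l.foldl pvStepA (PySem.Dict.empty, [])).2 = pvSpecList l := by
  induction l using List.reverseRecOn with
  | nil => exact ⟨fun x => by simp [PySem.Dict.getD_empty], rfl⟩
  | append_singleton l c ih =>
    rw [List.foldl_append, List.foldl_cons, List.foldl_nil]
    obtain ⟨ihd, ihs⟩ := ih
    have hfst : ∀ x, (pvStepA (l.foldl pvStepA (PySem.Dict.empty, [])) c).1.getD x 0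
        = ((l ++ [c]).count x : Int) := by
      intro x
      rw [pvStepA_fst, pvStepA_getD, ihd]
      by_cases hx : x = c
      · subst hx; simp [List.count_append]
      · simp [List.count_append, hx, List.count_singleton, if_neg (Ne.symm hx)]
    refine ⟨hfst, ?_⟩
    have hc := hfst c
    rw [pvStepA_fst] at hc
    rw [pvStepA_snd, ihs, hc, pvSpecList_append_singleton]

-- ---- B-side: the group-and-scatter produces pvSpecList ----

-- the positions of letter c in l, as the grouping pass stores them
def pvPos (l : List Char) (c : Char) : List Int :=
  ((PySem.List.enumerate l).filter (fun p => p.2 == c)).map (·.1)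

-- the target value at slot j
def pvVal (l : List Char) (j : Nat) : String :=
  PySem.List.pyGetD (pvSpecList l) ((j : Nat) : Int) ""

-- the scatter pass for one letter
def pvUpd (l : List Char) (out : List String) (c : Char) : List String :=
  (PySem.List.enumerate (pvPos l c) 1).foldl
    (fun out r => PySem.List.pySetD out r.2 (String.ofList (c :: PySem.Int.toChars r.1))) out

lemma pvGroups_getD (l : List Char) (c : Char) :
    ((PySem.List.enumerate l).foldl
      (fun d p => d.modify p.2 [] (· ++ [p.1])) PySem.Dict.empty).getD c [] = pvPos l c := by
  have h : (PySem.List.enumerate l).foldl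
      (fun d p => d.modify p.2 [] (· ++ [p.1])) PySem.Dict.empty
    = ((PySem.List.enumerate l).map Prod.swap).foldl
      (fun d q => d.modify q.1 [] (· ++ [q.2])) PySem.Dict.empty := by
    rw [List.foldl_map]; rfl
  rw [h, PySem.Dict.getD_foldl_modify_append, PySem.Dict.getD_empty]
  simp [pvPos, List.filter_map, Function.comp_def]

lemma pvGroups_keys (l : List Char) :
    ((PySem.List.enumerate l).foldl
      (fun d p => d.modify p.2 [] (· ++ [p.1])) PySem.Dict.empty).keys = PySem.Set.ofList l := by
  rw [PySem.Dict.keys_foldl_modify_key]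
  simp [PySem.List.map_snd_enumerate, PySem.Set.update_nil_left]

lemma pvGroups_items (l : List Char) :
    ((PySem.List.enumerate l).foldl
      (fun d p => d.modify p.2 [] (· ++ [p.1])) PySem.Dict.empty).items
      = (PySem.Set.ofList l).map (fun c => (c, pvPos l c)) := by
  rw [PySem.Dict.items_eq_map_keys _
    (PySem.Dict.nodup_keys_foldl_modify_key _ _ _ _ _ PySem.Dict.nodup_keys_empty) []]
  rw [pvGroups_keys]
  apply List.map_congr_left
  intro c _
  rw [pvGroups_getD]

lemma pvLength_specList (l : List Char) : (pvSpecList l).length = l.length := by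
  simp [pvSpecList, PySem.List.length_enumerate]

lemma pvMem_pvPos (l : List Char) (c : Char) (i : Int) (hi : i ∈ pvPos l c) :
    ∃ k : Nat, k < l.length ∧ i = (k : Int) := by
  simp only [pvPos, List.mem_map, List.mem_filter] at hi
  obtain ⟨p, ⟨hp, _⟩, rfl⟩ := hi
  obtain ⟨k, hk, rfl⟩ := (PySem.List.mem_enumerate_iff _ _ _).1 hp
  exact ⟨k, hk, by simp⟩

lemma pvPos_append (l : List Char) (x c : Char) :
    pvPos (l ++ [x]) c = pvPos l c ++ (if x = c then [(l.length : Int)] else []) := by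
  unfold pvPos
  rw [PySem.List.enumerate_append]
  simp only [PySem.List.enumerate_cons, PySem.List.enumerate_nil, List.filter_append, List.map_append]
  congr 1
  by_cases hx : x = c <;> simp [hx]

lemma pvPos_length (l : List Char) (c : Char) : (pvPos l c).length = l.count c := by
  unfold pvPos
  rw [List.length_map, ← List.countP_eq_length_filter]
  conv_rhs => rw [← PySem.List.map_snd_enumerate l 0]
  rw [List.count_eq_countP, List.countP_map]
  rfl

lemma pvVal_append_lt (l : List Char) (x : Char) (j : Nat) (hj : j < l.length) :
    pvVal (l ++ [x]) j = pvVal l j := by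
  unfold pvVal
  rw [pvSpecList_append_singleton]
  simp only [PySem.List.pyGetD_natCast, List.getD]
  rw [List.getElem?_append_left (by rw [pvLength_specList]; exact hj)]

lemma pvVal_append_last (l : List Char) (x : Char) :
    pvVal (l ++ [x]) l.length
      = String.ofList (x :: PySem.Int.toChars (((l ++ [x]).count x : Nat) : Int)) := by
  unfold pvVal
  rw [pvSpecList_append_singleton]
  simp only [PySem.List.pyGetD_natCast, List.getD]
  rw [show l.length = (pvSpecList l).length from (pvLength_specList l).symm,
    List.getElem?_append_right (le_refl _)]
  simp

lemma pvLength_scatter (ps : List Int) (s : Int) (g : Int → String) (out : List String) :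
    ((PySem.List.enumerate ps s).foldl
      (fun out r => PySem.List.pySetD out r.2 (g r.1)) out).length = out.length := by
  induction ps generalizing s out with
  | nil => rfl
  | cons i ps ih =>
    rw [PySem.List.enumerate_cons, List.foldl_cons, ih]
    exact PySem.List.length_pySetD _ _ _

lemma pvNoTouch (ps : List Int) (s : Int) (g : Int → String) (out : List String) (j : Nat)
    (h : ∀ i ∈ ps, 0 ≤ i ∧ i ≠ (j : Int)) :
    PySem.List.pyGetD ((PySem.List.enumerate ps s).foldl
      (fun out r => PySem.List.pySetD out r.2 (g r.1)) out) (j : Int) ""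
    = PySem.List.pyGetD out (j : Int) "" := by
  induction ps generalizing s out with
  | nil => rfl
  | cons i ps ih =>
    rw [PySem.List.enumerate_cons, List.foldl_cons, ih _ _ (fun i hi => h i (List.mem_cons_of_mem _ hi))]
    obtain ⟨h0, hne⟩ := h i (List.mem_cons_self)
    rw [PySem.List.pySetD_of_nonneg (h := h0)]
    have : i.toNat ≠ j := by omega
    simp [PySem.List.pyGetD_natCast, List.getD, List.getElem?_set_ne this]

lemma pvUpd_length (l : List Char) (out : List String) (c : Char) :
    (pvUpd l out c).length = out.length := by
  unfold pvUpd
  exact pvLength_scatter (pvPos l c) 1 (fun m => String.ofList (c :: PySem.Int.toChars m)) out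

lemma pvUpd_getD (l : List Char) (c : Char) :
    ∀ (out : List String), l.length ≤ out.length → ∀ (j : Nat) (hj : j < l.length),
    PySem.List.pyGetD (pvUpd l out c) (j : Int) ""
    = if l[j] = c then pvVal l j else PySem.List.pyGetD out (j : Int) "" := by
  induction l using List.reverseRecOn with
  | nil => intro out _ j hj; simp at hj
  | append_singleton l x ih =>
    intro out hlen j hj
    have hupd : pvUpd (l ++ [x]) out c
        = if x = c then
            PySem.List.pySetD (pvUpd l out c) ((l.length : Nat) : Int)
              (String.ofList (c :: PySem.Int.toChars (1 + ((pvPos l c).length : Int))))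
          else pvUpd l out c := by
      unfold pvUpd
      rw [pvPos_append]
      by_cases hx : x = c
      · simp only [hx, if_true]
        rw [PySem.List.enumerate_append, List.foldl_append]
        simp [PySem.List.enumerate_cons, PySem.List.enumerate_nil]
      · simp [hx]
    by_cases hx : x = c
    · rw [hupd, if_pos hx]
      have hlt : l.length < (pvUpd l out c).length := by
        rw [pvUpd_length]; simp at hlen; omega
      rw [PySem.List.pyGetD_pySetD_natCast _ _ _ _ _ hlt]
      by_cases hje : j = l.length
      · subst hje
        have hgetx : (l ++ [x])[l.length]'hj = x := by
          rw [List.getElem_append_right (le_refl _)]; simp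
        rw [if_pos rfl, hgetx, if_pos hx, hx, pvVal_append_last]
        have hc : (l ++ [c]).count c = l.count c + 1 := by simp
        have harg : (1 : Int) + ((pvPos l c).length : Int) = (((l ++ [c]).count c : Nat) : Int) := by
          rw [pvPos_length, hc]; push_cast; ring
        rw [harg]
      · have hjl : j < l.length := by simp at hj; omega
        rw [if_neg (by exact_mod_cast hje)]
        rw [ih out (by simp at hlen; omega) j hjl]
        have hgj : (l ++ [x])[j] = l[j] := List.getElem_append_left hjl
        rw [hgj, pvVal_append_lt _ _ _ hjl]
    · rw [hupd, if_neg hx]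
      by_cases hje : j = l.length
      · subst hje
        have hgetx : (l ++ [x])[l.length]'hj = x := by
          rw [List.getElem_append_right (le_refl _)]; simp
        rw [hgetx, if_neg hx]
        unfold pvUpd
        refine pvNoTouch (pvPos l c) 1
          (fun m => String.ofList (c :: PySem.Int.toChars m)) out l.length ?_
        intro i hi
        obtain ⟨k, hk, rfl⟩ := pvMem_pvPos l c i hi
        constructor
        · exact_mod_cast Nat.zero_le k
        · intro hcontra
          have : k = l.length := by exact_mod_cast hcontra
          omega
      · have hjl : j < l.length := by simp at hj; omega
        rw [ih out (by simp at hlen; omega) j hjl]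
        have hgj : (l ++ [x])[j] = l[j] := List.getElem_append_left hjl
        rw [hgj, pvVal_append_lt _ _ _ hjl]

lemma pvOuter (l : List Char) (ks : List Char) :
    ∀ out : List String, l.length ≤ out.length →
      (ks.foldl (fun o c => pvUpd l o c) out).length = out.length ∧
      ∀ (j : Nat) (hj : j < l.length),
        PySem.List.pyGetD (ks.foldl (fun o c => pvUpd l o c) out) (j : Int) ""
        = if l[j] ∈ ks then pvVal l j else PySem.List.pyGetD out (j : Int) "" := by
  induction ks with
  | nil => intro out hlen; exact ⟨rfl, fun j hj => by simp⟩
  | cons c ks ih =>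
    intro out hlen
    rw [List.foldl_cons]
    obtain ⟨ihlen, ihget⟩ := ih (pvUpd l out c) (by rw [pvUpd_length]; exact hlen)
    refine ⟨by rw [ihlen, pvUpd_length], fun j hj => ?_⟩
    rw [ihget j hj, pvUpd_getD l c out hlen j hj]
    by_cases h1 : l[j] ∈ ks <;> by_cases h2 : l[j] = c <;>
      simp [h1, h2, List.mem_cons]

lemma pvAlt_eq_spec (w : String) : get_indexed_word_alt w = pvSpecList w.toList := by
  have hfold : get_indexed_word_alt w
      = (PySem.Set.ofList w.toList).foldl (fun o c => pvUpd w.toList o c)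
          (List.replicate w.toList.length "") := by
    show (((PySem.List.enumerate w.toList).foldl
      (fun d p => d.modify p.2 [] (· ++ [p.1])) PySem.Dict.empty).items).foldl _
        (List.replicate w.toList.length "") = _
    rw [pvGroups_items, List.foldl_map]
    rfl
  obtain ⟨hlen, hget⟩ := pvOuter w.toList (PySem.Set.ofList w.toList)
      (List.replicate w.toList.length "") (by simp)
  rw [hfold]
  apply List.ext_getElem
  · rw [hlen, List.length_replicate, pvLength_specList]
  · intro j h1 h2
    have hj : j < w.toList.length := by rwa [hlen, List.length_replicate] at h1
    have hmem : w.toList[j] ∈ PySem.Set.ofList w.toList :=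
      (PySem.Set.mem_ofList _ _).2 (List.getElem_mem hj)
    have hthis := hget j hj
    rw [if_pos hmem] at hthis
    rw [pvVal, PySem.List.pyGetD_natCast, PySem.List.pyGetD_natCast,
      List.getD_eq_getElem?_getD, List.getD_eq_getElem?_getD,
      List.getElem?_eq_getElem h1, List.getElem?_eq_getElem h2] at hthis
    simpa using hthis

-- ===== VERDICT (by name: the statement is the Claim_ definition above) =====
theorem get_indexed_word_spec : Claim_equal_get_indexed_word := by
  intro w _
  unfold Spec_get_indexed_word get_indexed_word
  rw [(pvLoop_invariant w.toList).2, pvAlt_eq_spec]
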